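-- pv_equiv track=rewrite | github.com/gedemais-formations/tetris | rotate.py | replace_cases
-- ===== SOURCE A (Python) =====
-- def replace_cases(piece):
--     size = len(piece)
--     lowest_x = size
--     highest_y = 0
--
--     for y in range(size):
--         for x in range(size):
--             if piece[y][x] == 1:
--                 if x < lowest_x :
--                     lowest_x = x
--                 if y > highest_y :
--                     highest_y = y
--
--     for y in range(size - 1, -1, -1):
--         for x in range(size):
--             if piece[y][x] == 1:
--                 piece[y][x] = 0;
--                 piece[y + (size - 1 - highest_y)][x - lowest_x] = 1;
--
--     return piece
-- ===== SOURCE B (Python) =====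
-- def replace_cases(piece):
--     size = len(piece)
--     filled = [(y, x) for y in range(size) for x in range(size) if piece[y][x] == 1]
--     if not filled:
--         return piece
--     dy = size - 1 - max(y for y, _ in filled)
--     dx = min(x for _, x in filled)
--     fset = set(filled)
--     for y in range(size):
--         row = piece[y]
--         for x in range(size):
--             if (y - dy, x + dx) in fset:
--                 row[x] = 1
--             elif row[x] == 1:
--                 row[x] = 0
--     return piece
-- ===== Notes on version B (the rewrite author's own statement) =====
-- stated objective: alternative
-- what changed: B makes one scan collecting the coordinates of filled cells (deriving the shift from their max-y/min-x) and then rewrites the grid in one forward pass per cell against a set of those coordinates, instead of A's second descending rescan that moves each filled cell in place; equivalence is about the returned grid (both mutate the argument).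
import Mathlib
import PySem

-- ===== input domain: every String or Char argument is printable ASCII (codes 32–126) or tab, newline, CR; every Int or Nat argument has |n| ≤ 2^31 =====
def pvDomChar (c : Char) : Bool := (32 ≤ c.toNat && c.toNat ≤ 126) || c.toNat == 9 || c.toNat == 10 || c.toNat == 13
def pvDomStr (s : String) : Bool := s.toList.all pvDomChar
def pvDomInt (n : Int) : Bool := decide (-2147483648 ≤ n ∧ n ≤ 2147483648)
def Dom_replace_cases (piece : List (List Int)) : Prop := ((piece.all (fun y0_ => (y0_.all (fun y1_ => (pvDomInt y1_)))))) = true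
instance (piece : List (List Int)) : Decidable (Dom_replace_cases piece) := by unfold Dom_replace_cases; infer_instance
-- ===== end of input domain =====

-- B collects the filled cells' coordinates in one scan and rewrites the grid in a single forward
-- pass from that index, instead of A's descending rescan moving cells in place; same returned grid
-- (both Pythons mutate the argument in place; the equivalence proved here is about the return value).

-- ===== PORT A =====
-- piece[y][x]  (total read form; Pre_ keeps every index used in range)
def pvCell (g : List (List Int)) (y x : Int) : Int :=
  PySem.List.pyGetD (PySem.List.pyGetD g y []) x 0

-- piece[y][x] = v
def pvSetCell (g : List (List Int)) (y x v : Int) : List (List Int) :=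
  PySem.List.pySetD g y (PySem.List.pySetD (PySem.List.pyGetD g y []) x v)

-- the two in-loop updates of (lowest_x, highest_y) for a filled cell (y, x)
def pvMinMaxStep (s : Int × Int) (y x : Int) : Int × Int :=
  let s1 := if x < s.1 then (x, s.2) else s
  if y > s1.2 then (s1.1, y) else s1

-- A's first double loop: (lowest_x, highest_y)
def pvBounds (piece : List (List Int)) : Int × Int :=
  (PySem.List.pyRange 0 (piece.length : Int) 1).foldl (fun s y =>
    (PySem.List.pyRange 0 (piece.length : Int) 1).foldl (fun (s : Int × Int) x =>
      if pvCell piece y x = 1 then pvMinMaxStep s y x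
      else s) s) ((piece.length : Int), 0)

def replace_cases (piece : List (List Int)) : List (List Int) :=
  (PySem.List.pyRange ((piece.length : Int) - 1) (-1) (-1)).foldl (fun g y =>
    (PySem.List.pyRange 0 (piece.length : Int) 1).foldl (fun g x =>
      if pvCell g y x = 1 then
        pvSetCell (pvSetCell g y x 0)
          (y + ((piece.length : Int) - 1 - (pvBounds piece).2)) (x - (pvBounds piece).1) 1
      else g) g) piece

-- ===== PORT B =====
-- [(y, x) for y in range(size) for x in range(size) if piece[y][x] == 1]
def pvFilledB (piece : List (List Int)) : List (Int × Int) :=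
  (PySem.List.pyRange 0 (piece.length : Int) 1).foldl (fun acc y =>
    (PySem.List.pyRange 0 (piece.length : Int) 1).foldl (fun acc x =>
      if pvCell piece y x = 1 then acc ++ [(y, x)] else acc) acc) []

def pvDyB (piece : List (List Int)) : Int :=
  (piece.length : Int) - 1 - (((pvFilledB piece).map Prod.fst).max?.getD 0)

def pvDxB (piece : List (List Int)) : Int :=
  ((pvFilledB piece).map Prod.snd).min?.getD 0

-- fset = set(filled)
def pvFSetB (piece : List (List Int)) : PySem.Set (Int × Int) :=
  PySem.Set.ofList (pvFilledB piece)

def replace_cases_alt (piece : List (List Int)) : List (List Int) :=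
  if pvFilledB piece = [] then piece
  else
    (PySem.List.pyRange 0 (piece.length : Int) 1).foldl (fun g y =>
      PySem.List.pySetD g y
        ((PySem.List.pyRange 0 (piece.length : Int) 1).foldl (fun row x =>
          if (y - pvDyB piece, x + pvDxB piece) ∈ pvFSetB piece then PySem.List.pySetD row x 1
          else if PySem.List.pyGetD row x 0 = 1 then PySem.List.pySetD row x 0
          else row) (PySem.List.pyGetD g y []))) piece

-- ===== PRECONDITION & SPEC =====
-- Pre_: every row at least as long as the grid (A unconditionally reads piece[y][x] for all
-- y,x < len(piece) and raises IndexError on any shorter row; it returns exactly on these inputs).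
def Pre_replace_cases (piece : List (List Int)) : Prop :=
  ∀ row ∈ piece, piece.length ≤ row.length
instance (piece : List (List Int)) : Decidable (Pre_replace_cases piece) := by
  unfold Pre_replace_cases; infer_instance
def pvWitness_replace_cases : List (List Int) := [[0, 1], [1, 0]]

def Spec_replace_cases (piece : List (List Int)) (out : List (List Int)) : Prop := out = replace_cases_alt piece
instance (piece : List (List Int)) (out : List (List Int)) : Decidable (Spec_replace_cases piece out) := by unfold Spec_replace_cases; infer_instance

-- ===== CLAIM (what is proved, stated in full; the proofs are below) =====
def Claim_equal_replace_cases : Prop := ∀ (piece : List (List Int)), Dom_replace_cases piece → Pre_replace_cases piece → Spec_replace_cases piece (replace_cases piece)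

-- ===== LEMMAS AND PROOFS =====

-- ---- generic list lemmas ----
theorem pv_foldl_double' {α : Type} (f : α → Int → Int → α) (R S : List Int) :
    ∀ (init : α), R.foldl (fun a y => S.foldl (fun a x => f a y x) a) init
      = (R.flatMap (fun y => S.map (fun x => (y, x)))).foldl (fun a p => f a p.1 p.2) init := by
  induction R with
  | nil => intro init; simp
  | cons y R ih =>
    intro init
    simp only [List.foldl_cons, List.flatMap_cons, List.foldl_append, List.foldl_map]
    exact ih _

theorem pv_foldl_double {α : Type} (f : α → Int × Int → α) (R S : List Int) :
    ∀ (init : α), R.foldl (fun a y => S.foldl (fun a x => f a (y, x)) a) init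
      = (R.flatMap (fun y => S.map (fun x => (y, x)))).foldl f init := by
  induction R with
  | nil => intro init; simp
  | cons y R ih =>
    intro init
    simp only [List.foldl_cons, List.flatMap_cons, List.foldl_append, List.foldl_map]
    exact ih _

theorem pv_foldl_skip {α β : Type} (p : β → Prop) [DecidablePred p] (u : α → β → α) :
    ∀ (l : List β) (init : α),
      l.foldl (fun a x => if p x then u a x else a) init
        = (l.filter (fun x => decide (p x))).foldl u init := by
  intro l
  induction l with
  | nil => intro init; simp
  | cons x l ih =>
    intro init
    by_cases h : p x <;> simp [h, ih]

-- the index list of the double scan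
def pvL (n : Int) : List (Int × Int) :=
  (PySem.List.pyRange 0 n 1).flatMap (fun y => (PySem.List.pyRange 0 n 1).map (fun x => (y, x)))

theorem pv_mem_L (n : Int) (p : Int × Int) :
    p ∈ pvL n ↔ 0 ≤ p.1 ∧ p.1 < n ∧ 0 ≤ p.2 ∧ p.2 < n := by
  cases p with | mk a b =>
  simp only [pvL, List.mem_flatMap, List.mem_map, PySem.List.mem_pyRange_one]
  constructor
  · rintro ⟨y, hy, x, hx, h⟩
    obtain ⟨h1, h2⟩ := Prod.mk.inj h
    subst h1; subst h2
    exact ⟨hy.1, hy.2, hx.1, hx.2⟩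
  · rintro ⟨h1, h2, h3, h4⟩; exact ⟨a, ⟨h1, h2⟩, b, ⟨h3, h4⟩, rfl⟩

-- the filled-cell list, as a filter
def pvFilled (piece : List (List Int)) : List (Int × Int) :=
  (pvL (piece.length : Int)).filter (fun p => decide (pvCell piece p.1 p.2 = 1))

theorem pv_filledB_eq (piece : List (List Int)) : pvFilledB piece = pvFilled piece := by
  unfold pvFilledB pvFilled
  rw [pv_foldl_double (fun acc p => if pvCell piece p.1 p.2 = 1 then acc ++ [p] else acc)]
  rw [PySem.List.foldl_append_ite_eq_filter]
  simp [pvL]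

theorem pv_mem_filled (piece : List (List Int)) (p : Int × Int) :
    p ∈ pvFilled piece ↔ ((0 ≤ p.1 ∧ p.1 < (piece.length : Int) ∧ 0 ≤ p.2 ∧ p.2 < (piece.length : Int))
      ∧ pvCell piece p.1 p.2 = 1) := by
  rw [pvFilled, List.mem_filter, pv_mem_L]
  simp

-- ---- phase-1 characterisation ----
theorem pv_minmax_step (s : Int × Int) (y x : Int) :
    pvMinMaxStep s y x = (min s.1 x, max s.2 y) := by
  cases s with | mk a b =>
  unfold pvMinMaxStep
  dsimp only
  split_ifs <;> simp only [Prod.mk.injEq] <;> constructor <;> omega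

theorem pv_foldl_minmax (F : List (Int × Int)) :
    ∀ (a b : Int), F.foldl (fun s p => pvMinMaxStep s p.1 p.2) (a, b)
      = ((F.map Prod.snd).foldl min a, (F.map Prod.fst).foldl max b) := by
  induction F with
  | nil => intro a b; simp
  | cons p F ih =>
    intro a b
    rw [List.foldl_cons, pv_minmax_step, List.map_cons, List.map_cons,
      List.foldl_cons, List.foldl_cons]
    exact ih _ _

theorem pv_bounds_eq (piece : List (List Int)) :
    pvBounds piece = (((pvFilled piece).map Prod.snd).foldl min ((piece.length : Int)),
      ((pvFilled piece).map Prod.fst).foldl max 0) := by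
  unfold pvBounds
  rw [pv_foldl_double' (fun s y x => if pvCell piece y x = 1 then pvMinMaxStep s y x else s)]
  rw [pv_foldl_skip (fun p : Int × Int => pvCell piece p.1 p.2 = 1)
    (fun (s : Int × Int) (p : Int × Int) => pvMinMaxStep s p.1 p.2)]
  exact pv_foldl_minmax _ _ _

theorem pv_foldl_max_init_le (l : List Int) : ∀ b : Int, b ≤ l.foldl max b := by
  induction l with
  | nil => intro b; simp
  | cons a l ih => intro b; exact le_trans (le_max_left _ _) (ih _)

theorem pv_foldl_max_le (l : List Int) : ∀ (b : Int) (x : Int), x ∈ l → x ≤ l.foldl max b := by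
  induction l with
  | nil => simp
  | cons a l ih =>
    intro b x hx
    rw [List.foldl_cons]
    rcases List.mem_cons.mp hx with rfl | hx'
    · exact le_trans (le_max_right _ _) (pv_foldl_max_init_le _ _)
    · exact ih _ _ hx'

theorem pv_foldl_max_mem (l : List Int) : ∀ b : Int, l.foldl max b = b ∨ l.foldl max b ∈ l := by
  induction l with
  | nil => intro b; simp
  | cons a l ih =>
    intro b
    rw [List.foldl_cons]
    rcases ih (max b a) with h | h
    · rcases max_choice b a with h' | h'
      · left; rw [h, h']
      · right; rw [h, h']; exact List.mem_cons_self
    · right; exact List.mem_cons_of_mem _ h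

theorem pv_foldl_min_init_le (l : List Int) : ∀ b : Int, l.foldl min b ≤ b := by
  induction l with
  | nil => intro b; simp
  | cons a l ih => intro b; exact le_trans (ih _) (min_le_left _ _)

theorem pv_foldl_min_le (l : List Int) : ∀ (b : Int) (x : Int), x ∈ l → l.foldl min b ≤ x := by
  induction l with
  | nil => simp
  | cons a l ih =>
    intro b x hx
    rw [List.foldl_cons]
    rcases List.mem_cons.mp hx with rfl | hx'
    · exact le_trans (pv_foldl_min_init_le _ _) (min_le_right _ _)
    · exact ih _ _ hx'

theorem pv_foldl_min_mem (l : List Int) : ∀ b : Int, l.foldl min b = b ∨ l.foldl min b ∈ l := by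
  induction l with
  | nil => intro b; simp
  | cons a l ih =>
    intro b
    rw [List.foldl_cons]
    rcases ih (min b a) with h | h
    · rcases min_choice b a with h' | h'
      · left; rw [h, h']
      · right; rw [h, h']; exact List.mem_cons_self
    · right; exact List.mem_cons_of_mem _ h

theorem pv_foldl_max_head (a : Int) (l : List Int) (h : 0 ≤ a) :
    (a :: l).foldl max 0 = ((a :: l).max?.getD 0) := by
  have h1 : (a :: l).max? = some (l.foldl max a) := by simp [List.max?]
  rw [h1, List.foldl_cons, max_eq_right h]
  rfl

theorem pv_foldl_min_head (n a : Int) (l : List Int) (h : a ≤ n) :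
    (a :: l).foldl min n = ((a :: l).min?.getD 0) := by
  have h1 : (a :: l).min? = some (l.foldl min a) := by simp [List.min?]
  rw [h1, List.foldl_cons, min_eq_right h]
  rfl

-- ---- pointwise grid infrastructure ----
theorem pv_getD_set {α : Type} (l : List α) (i : Nat) (a : α) (j : Nat) (d : α) :
    (l.set i a).getD j d = if j = i ∧ i < l.length then a else l.getD j d := by
  rw [List.getD_eq_getElem?_getD, List.getD_eq_getElem?_getD, List.getElem?_set]
  by_cases h1 : i = j
  · subst h1
    by_cases h2 : i < l.length <;> simp [h2]
  · rw [if_neg h1, if_neg (by rintro ⟨hh, _⟩; exact h1 hh.symm)]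

theorem pv_cell_natCast (g : List (List Int)) (r c : Nat) :
    pvCell g (r : Int) (c : Int) = (g.getD r []).getD c 0 := by
  simp [pvCell, PySem.List.pyGetD_natCast]

def pvShape (g piece : List (List Int)) : Prop :=
  g.length = piece.length ∧ ∀ r : Nat, (g.getD r []).length = (piece.getD r []).length

theorem pv_shape_refl (piece : List (List Int)) : pvShape piece piece := ⟨rfl, fun _ => rfl⟩

theorem pv_shape_setCell (g piece : List (List Int)) (y x v : Int) (hy : 0 ≤ y)
    (h : pvShape g piece) : pvShape (pvSetCell g y x v) piece := by
  obtain ⟨yn, rfl⟩ := Int.eq_ofNat_of_zero_le hy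
  unfold pvSetCell
  rw [PySem.List.pySetD_natCast, PySem.List.pyGetD_natCast]
  refine ⟨by rw [List.length_set]; exact h.1, fun r => ?_⟩
  rw [pv_getD_set]
  by_cases hc : r = yn ∧ yn < g.length
  · rw [if_pos hc, PySem.List.length_pySetD, hc.1]; exact h.2 yn
  · rw [if_neg hc]; exact h.2 r

theorem pv_cell_setCell (g : List (List Int)) (y x v r c : Int)
    (hy0 : 0 ≤ y) (hy1 : y < (g.length : Int))
    (hx0 : 0 ≤ x) (hx1 : x < ((g.getD y.toNat []).length : Int))
    (hr : 0 ≤ r) (hc : 0 ≤ c) :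
    pvCell (pvSetCell g y x v) r c = if r = y ∧ c = x then v else pvCell g r c := by
  obtain ⟨yn, rfl⟩ := Int.eq_ofNat_of_zero_le hy0
  obtain ⟨xn, rfl⟩ := Int.eq_ofNat_of_zero_le hx0
  obtain ⟨rn, rfl⟩ := Int.eq_ofNat_of_zero_le hr
  obtain ⟨cn, rfl⟩ := Int.eq_ofNat_of_zero_le hc
  rw [Int.toNat_natCast] at hx1
  unfold pvSetCell
  rw [PySem.List.pySetD_natCast, PySem.List.pyGetD_natCast, PySem.List.pySetD_natCast,
    pv_cell_natCast, pv_cell_natCast, pv_getD_set]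
  by_cases h1 : rn = yn ∧ yn < g.length
  · obtain ⟨rfl, hyl⟩ := h1
    rw [if_pos ⟨rfl, hyl⟩, pv_getD_set]
    by_cases h2 : cn = xn ∧ xn < (g.getD rn []).length
    · obtain ⟨rfl, hxl⟩ := h2
      rw [if_pos ⟨rfl, hxl⟩, if_pos ⟨rfl, rfl⟩]
    · have hxl : xn < (g.getD rn []).length := by exact_mod_cast hx1
      have hcx : cn ≠ xn := fun hh => h2 ⟨hh, hxl⟩
      rw [if_neg h2, if_neg (by rintro ⟨_, hb⟩; exact hcx (by exact_mod_cast hb))]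
  · have hyl : yn < g.length := by exact_mod_cast hy1
    have hry : rn ≠ yn := fun hh => h1 ⟨hh, hyl⟩
    rw [if_neg h1, if_neg (by rintro ⟨ha, _⟩; exact hry (by exact_mod_cast ha))]

def pvRowLen (piece : List (List Int)) (r : Int) : Int := ((piece.getD r.toNat []).length : Int)

def pvStv (piece : List (List Int)) (filled : List (Int × Int)) (dy dx k j r c : Int) : Int :=
  if (r - dy, c + dx) ∈ filled ∧ (k + 1 ≤ r - dy ∨ (r - dy = k ∧ c + dx < j)) then 1
  else if (r, c) ∈ filled ∧ (k + 1 ≤ r ∨ (r = k ∧ c < j)) then 0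
  else pvCell piece r c

def pvInv (piece : List (List Int)) (filled : List (Int × Int)) (dy dx k j : Int)
    (g : List (List Int)) : Prop :=
  pvShape g piece ∧ ∀ r c : Int, 0 ≤ r → r < (piece.length : Int) → 0 ≤ c → c < pvRowLen piece r →
    pvCell g r c = pvStv piece filled dy dx k j r c

def pvHyps (piece : List (List Int)) (filled : List (Int × Int)) (dy dx : Int) : Prop :=
  (∀ p ∈ filled, 0 ≤ p.1 ∧ p.1 < (piece.length : Int) ∧ 0 ≤ p.2 ∧ p.2 < (piece.length : Int)) ∧
  (∀ y x : Int, 0 ≤ y → y < (piece.length : Int) → 0 ≤ x → x < (piece.length : Int) →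
      (pvCell piece y x = 1 ↔ (y, x) ∈ filled)) ∧
  (∀ p ∈ filled, 0 ≤ dy ∧ p.1 + dy < (piece.length : Int) ∧ 0 ≤ dx ∧ dx ≤ p.2) ∧
  (∀ row ∈ piece, piece.length ≤ row.length)

theorem pv_rowlen_ge (piece : List (List Int)) (hpre : ∀ row ∈ piece, piece.length ≤ row.length)
    (r : Int) (h0 : 0 ≤ r) (h1 : r < (piece.length : Int)) :
    (piece.length : Int) ≤ pvRowLen piece r := by
  have hlt : r.toNat < piece.length := by omega
  have hmem : piece.getD r.toNat [] ∈ piece := by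
    rw [List.getD_eq_getElem _ _ hlt]; exact List.getElem_mem hlt
  have := hpre _ hmem
  unfold pvRowLen; omega

theorem pv_stv_self (piece : List (List Int)) (filled : List (Int × Int)) (dy dx : Int)
    (H : pvHyps piece filled dy dx) (k j : Int) :
    pvStv piece filled dy dx k j k j = pvCell piece k j := by
  unfold pvStv
  rw [if_neg, if_neg]
  · rintro ⟨_, h⟩; omega
  · rintro ⟨hm, hc⟩
    have h3 := H.2.2.1 _ hm
    simp only at h3
    omega

-- ---- the A-side loop invariant: pvStv transition lemmas ----
theorem pv_stv_step_filled (piece : List (List Int)) (filled : List (Int × Int)) (dy dx : Int)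
    (H : pvHyps piece filled dy dx) (k j r c : Int) (hmem : ((k, j) : Int × Int) ∈ filled) :
    (if r = k + dy ∧ c = j - dx then (1 : Int) else if r = k ∧ c = j then 0
      else pvStv piece filled dy dx k j r c) = pvStv piece filled dy dx k (j + 1) r c := by
  have hd := H.2.2.1 _ hmem
  simp only at hd
  by_cases h1 : r = k + dy ∧ c = j - dx
  · obtain ⟨h1a, h1b⟩ := h1
    rw [if_pos ⟨h1a, h1b⟩]
    unfold pvStv
    have hp : ((r - dy, c + dx) : Int × Int) = (k, j) := by
      simp only [Prod.mk.injEq]; omega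
    rw [if_pos ⟨by rw [hp]; exact hmem, Or.inr ⟨by omega, by omega⟩⟩]
  · by_cases h2 : r = k ∧ c = j
    · obtain ⟨rfl, rfl⟩ := h2
      rw [if_neg h1, if_pos ⟨rfl, rfl⟩]
      unfold pvStv
      rw [if_neg ?_, if_pos ⟨hmem, Or.inr ⟨rfl, by omega⟩⟩]
      rintro ⟨hm1, hcond⟩
      have hd1 := H.2.2.1 _ hm1
      simp only at hd1
      omega
    · rw [if_neg h1, if_neg h2]
      unfold pvStv
      by_cases m1 : ((r - dy, c + dx) : Int × Int) ∈ filled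
      · have hd1 := H.2.2.1 _ m1
        simp only at hd1
        by_cases m2 : ((r, c) : Int × Int) ∈ filled
        · simp only [m1, m2, true_and]
          split_ifs <;> omega
        · simp only [m1, m2, true_and, false_and, if_false]
          split_ifs <;> omega
      · by_cases m2 : ((r, c) : Int × Int) ∈ filled <;>
          simp only [m1, m2, true_and, false_and, if_false] <;> split_ifs <;> omega

theorem pv_stv_step_skip (piece : List (List Int)) (filled : List (Int × Int)) (dy dx k j r c : Int)
    (hnot : ((k, j) : Int × Int) ∉ filled) :
    pvStv piece filled dy dx k (j + 1) r c = pvStv piece filled dy dx k j r c := by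
  unfold pvStv
  by_cases m1 : ((r - dy, c + dx) : Int × Int) ∈ filled
  · have hne1 : ¬(r - dy = k ∧ c + dx = j) := by
      rintro ⟨ha, hb⟩
      apply hnot
      rw [show ((k, j) : Int × Int) = (r - dy, c + dx) by simp only [Prod.mk.injEq]; omega]
      exact m1
    by_cases m2 : ((r, c) : Int × Int) ∈ filled
    · have hne2 : ¬(r = k ∧ c = j) := by
        rintro ⟨ha, hb⟩
        apply hnot
        rw [show ((k, j) : Int × Int) = (r, c) by simp only [Prod.mk.injEq]; omega]
        exact m2
      simp only [m1, m2, true_and]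
      split_ifs <;> omega
    · simp only [m1, m2, true_and, false_and, if_false]
      split_ifs <;> omega
  · by_cases m2 : ((r, c) : Int × Int) ∈ filled
    · have hne2 : ¬(r = k ∧ c = j) := by
        rintro ⟨ha, hb⟩
        apply hnot
        rw [show ((k, j) : Int × Int) = (r, c) by simp only [Prod.mk.injEq]; omega]
        exact m2
      simp only [m1, m2, true_and, false_and, if_false]
      split_ifs <;> omega
    · simp only [m1, m2, false_and, if_false]

theorem pv_stv_row (piece : List (List Int)) (filled : List (Int × Int)) (dy dx : Int)
    (H : pvHyps piece filled dy dx) (k r c : Int) :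
    pvStv piece filled dy dx k (piece.length : Int) r c
      = pvStv piece filled dy dx (k - 1) 0 r c := by
  unfold pvStv
  by_cases m1 : ((r - dy, c + dx) : Int × Int) ∈ filled
  · have h1 := H.1 _ m1
    simp only at h1
    by_cases m2 : ((r, c) : Int × Int) ∈ filled
    · have h2 := H.1 _ m2
      simp only at h2
      simp only [m1, m2, true_and]
      split_ifs <;> omega
    · simp only [m1, m2, true_and, false_and, if_false]
      split_ifs <;> omega
  · by_cases m2 : ((r, c) : Int × Int) ∈ filled
    · have h2 := H.1 _ m2
      simp only at h2
      simp only [m1, m2, true_and, false_and, if_false]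
      split_ifs <;> omega
    · simp only [m1, m2, false_and, if_false]

theorem pv_stv_init (piece : List (List Int)) (filled : List (Int × Int)) (dy dx : Int)
    (H : pvHyps piece filled dy dx) (r c : Int) :
    pvStv piece filled dy dx ((piece.length : Int) - 1) 0 r c = pvCell piece r c := by
  unfold pvStv
  rw [if_neg, if_neg]
  · rintro ⟨hm, hcond⟩
    have h2 := H.1 _ hm
    simp only at h2
    omega
  · rintro ⟨hm, hcond⟩
    have h1 := H.1 _ hm
    simp only at h1
    omega

-- ---- the A-side second loop ----
theorem pv_stepA (piece : List (List Int)) (filled : List (Int × Int)) (dy dx : Int)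
    (H : pvHyps piece filled dy dx) (k j : Int)
    (hk0 : 0 ≤ k) (hk1 : k < (piece.length : Int)) (hj0 : 0 ≤ j) (hj1 : j < (piece.length : Int))
    (g : List (List Int)) (hg : pvInv piece filled dy dx k j g) :
    pvInv piece filled dy dx k (j + 1)
      (if pvCell g k j = 1 then pvSetCell (pvSetCell g k j 0) (k + dy) (j - dx) 1 else g) := by
  have hrlk : (piece.length : Int) ≤ pvRowLen piece k := pv_rowlen_ge piece H.2.2.2 k hk0 hk1
  have hread : pvCell g k j = pvCell piece k j := by
    rw [hg.2 k j hk0 hk1 hj0 (by omega), pv_stv_self piece filled dy dx H k j]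
  have hglen : (g.length : Int) = (piece.length : Int) := by exact_mod_cast hg.1.1
  by_cases hc : pvCell g k j = 1
  · rw [if_pos hc]
    have hmem : ((k, j) : Int × Int) ∈ filled := (H.2.1 k j hk0 hk1 hj0 hj1).1 (hread ▸ hc)
    have hd := H.2.2.1 _ hmem
    simp only at hd
    have hshape' : pvShape (pvSetCell g k j 0) piece := pv_shape_setCell g piece k j 0 hk0 hg.1
    have hglen' : ((pvSetCell g k j 0).length : Int) = (piece.length : Int) := by
      exact_mod_cast hshape'.1
    have hrlkd : (piece.length : Int) ≤ pvRowLen piece (k + dy) :=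
      pv_rowlen_ge piece H.2.2.2 _ (by omega) (by omega)
    have hrow' : (((pvSetCell g k j 0).getD (k + dy).toNat []).length : Int)
        = pvRowLen piece (k + dy) := by
      unfold pvRowLen
      exact_mod_cast congrArg Nat.cast (hshape'.2 (k + dy).toNat)
    have hrowg : ((g.getD k.toNat []).length : Int) = pvRowLen piece k := by
      unfold pvRowLen
      exact_mod_cast congrArg Nat.cast (hg.1.2 k.toNat)
    constructor
    · exact pv_shape_setCell _ piece _ _ _ (by omega) hshape'
    · intro r c hr0 hr1 hc0 hc1
      rw [pv_cell_setCell (pvSetCell g k j 0) (k + dy) (j - dx) 1 r c (by omega) (by omega)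
        (by omega) (by omega) hr0 hc0]
      rw [pv_cell_setCell g k j 0 r c hk0 (by omega) hj0 (by omega) hr0 hc0]
      rw [hg.2 r c hr0 hr1 hc0 hc1]
      exact pv_stv_step_filled piece filled dy dx H k j r c hmem
  · rw [if_neg hc]
    refine ⟨hg.1, fun r c hr0 hr1 hc0 hc1 => ?_⟩
    rw [hg.2 r c hr0 hr1 hc0 hc1]
    have hnot : ((k, j) : Int × Int) ∉ filled := fun hm =>
      hc (hread.trans ((H.2.1 k j hk0 hk1 hj0 hj1).2 hm))
    exact (pv_stv_step_skip piece filled dy dx k j r c hnot).symm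

theorem pv_innerA (piece : List (List Int)) (filled : List (Int × Int)) (dy dx : Int)
    (H : pvHyps piece filled dy dx) (k : Int) (hk0 : 0 ≤ k) (hk1 : k < (piece.length : Int)) :
    ∀ (m : Nat) (j : Int), 0 ≤ j → j + (m : Int) = (piece.length : Int) →
    ∀ g, pvInv piece filled dy dx k j g →
    pvInv piece filled dy dx k (piece.length : Int)
      ((PySem.List.pyRange j (piece.length : Int) 1).foldl (fun g x =>
        if pvCell g k x = 1 then pvSetCell (pvSetCell g k x 0) (k + dy) (x - dx) 1 else g) g) := by
  intro m
  induction m with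
  | zero =>
    intro j hj0 hjm g hg
    rw [PySem.List.pyRange_one_eq_nil (by omega), List.foldl_nil]
    rwa [show j = (piece.length : Int) by omega] at hg
  | succ m ih =>
    intro j hj0 hjm g hg
    have hjm' : j + ((m : Int) + 1) = (piece.length : Int) := by push_cast at hjm; omega
    rw [PySem.List.pyRange_one_cons (by omega : j < (piece.length : Int)), List.foldl_cons]
    exact ih (j + 1) (by omega) (by omega) _
      (pv_stepA piece filled dy dx H k j hk0 hk1 hj0 (by omega) g hg)

theorem pv_rowstepA (piece : List (List Int)) (filled : List (Int × Int)) (dy dx : Int)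
    (H : pvHyps piece filled dy dx) (k : Int) (g : List (List Int))
    (hg : pvInv piece filled dy dx k (piece.length : Int) g) :
    pvInv piece filled dy dx (k - 1) 0 g :=
  ⟨hg.1, fun r c hr0 hr1 hc0 hc1 =>
    (hg.2 r c hr0 hr1 hc0 hc1).trans (pv_stv_row piece filled dy dx H k r c)⟩

theorem pv_outerA (piece : List (List Int)) (filled : List (Int × Int)) (dy dx : Int)
    (H : pvHyps piece filled dy dx) :
    ∀ (m : Nat) (k : Int), k = (m : Int) - 1 → k < (piece.length : Int) →
    ∀ g, pvInv piece filled dy dx k 0 g →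
    pvInv piece filled dy dx (-1) 0
      ((PySem.List.pyRange k (-1) (-1)).foldl (fun g y =>
        (PySem.List.pyRange 0 (piece.length : Int) 1).foldl (fun g x =>
          if pvCell g y x = 1 then pvSetCell (pvSetCell g y x 0) (y + dy) (x - dx) 1 else g) g) g) := by
  intro m
  induction m with
  | zero =>
    intro k hk hkn g hg
    rw [PySem.List.pyRange_neg_one_eq_nil (by omega), List.foldl_nil]
    rwa [show k = (-1 : Int) by omega] at hg
  | succ m ih =>
    intro k hk hkn g hg
    have hk' : k = (m : Int) := by push_cast at hk; omega
    rw [PySem.List.pyRange_neg_one_cons (by omega : (-1 : Int) < k), List.foldl_cons]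
    have hinner := pv_innerA piece filled dy dx H k (by omega) hkn piece.length 0 le_rfl
      (by omega) g hg
    exact ih (k - 1) (by omega) (by omega) _ (pv_rowstepA piece filled dy dx H k _ hinner)

theorem pv_initA (piece : List (List Int)) (filled : List (Int × Int)) (dy dx : Int)
    (H : pvHyps piece filled dy dx) :
    pvInv piece filled dy dx ((piece.length : Int) - 1) 0 piece :=
  ⟨pv_shape_refl piece, fun r c _ _ _ _ => (pv_stv_init piece filled dy dx H r c).symm⟩

-- ---- the B-side loop ----
def pvBFin (piece : List (List Int)) (filled : List (Int × Int)) (dy dx r c : Int) : Int :=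
  if (r - dy, c + dx) ∈ filled then 1
  else if pvCell piece r c = 1 then 0
  else pvCell piece r c

def pvBInv (piece : List (List Int)) (filled : List (Int × Int)) (dy dx k : Int)
    (g : List (List Int)) : Prop :=
  pvShape g piece ∧ ∀ r c : Int, 0 ≤ r → r < (piece.length : Int) → 0 ≤ c → c < pvRowLen piece r →
    pvCell g r c = if r < k ∧ c < (piece.length : Int) then pvBFin piece filled dy dx r c
      else pvCell piece r c

theorem pv_rowGet_set (row : List Int) (x v c : Int)
    (hx0 : 0 ≤ x) (hx1 : x < (row.length : Int)) (hc0 : 0 ≤ c) :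
    PySem.List.pyGetD (PySem.List.pySetD row x v) c 0
      = if c = x then v else PySem.List.pyGetD row c 0 := by
  obtain ⟨xn, rfl⟩ := Int.eq_ofNat_of_zero_le hx0
  obtain ⟨cn, rfl⟩ := Int.eq_ofNat_of_zero_le hc0
  rw [PySem.List.pySetD_natCast, PySem.List.pyGetD_natCast, PySem.List.pyGetD_natCast, pv_getD_set]
  have hxl : xn < row.length := by exact_mod_cast hx1
  by_cases h : cn = xn
  · subst h
    rw [if_pos ⟨rfl, hxl⟩, if_pos rfl]
  · rw [if_neg (by rintro ⟨hh, _⟩; exact h hh),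
      if_neg (by intro hh; exact h (by exact_mod_cast hh))]

theorem pv_rowB (piece : List (List Int)) (filled fset : List (Int × Int))
    (hmem : ∀ p : Int × Int, p ∈ fset ↔ p ∈ filled) (dy dx k : Int) :
    ∀ (m : Nat) (j : Int), 0 ≤ j → j + (m : Int) = (piece.length : Int) →
    ∀ row : List Int, (piece.length : Int) ≤ (row.length : Int) →
    (∀ c : Int, 0 ≤ c → c < (row.length : Int) →
      PySem.List.pyGetD row c 0
        = if c < j then pvBFin piece filled dy dx k c else pvCell piece k c) →
    (((PySem.List.pyRange j (piece.length : Int) 1).foldl (fun row x =>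
        if (k - dy, x + dx) ∈ fset then PySem.List.pySetD row x 1
        else if PySem.List.pyGetD row x 0 = 1 then PySem.List.pySetD row x 0
        else row) row).length = row.length ∧
      ∀ c : Int, 0 ≤ c → c < (row.length : Int) →
        PySem.List.pyGetD ((PySem.List.pyRange j (piece.length : Int) 1).foldl (fun row x =>
          if (k - dy, x + dx) ∈ fset then PySem.List.pySetD row x 1
          else if PySem.List.pyGetD row x 0 = 1 then PySem.List.pySetD row x 0
          else row) row) c 0
        = if c < (piece.length : Int) then pvBFin piece filled dy dx k c
          else pvCell piece k c) := by
  intro m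
  induction m with
  | zero =>
    intro j hj0 hjm row hlen hrow
    rw [PySem.List.pyRange_one_eq_nil (by omega), List.foldl_nil]
    refine ⟨rfl, fun c hc0 hc1 => ?_⟩
    rw [hrow c hc0 hc1, show j = (piece.length : Int) by omega]
  | succ m ih =>
    intro j hj0 hjm row hlen hrow
    have hjm' : j + ((m : Int) + 1) = (piece.length : Int) := by push_cast at hjm; omega
    rw [PySem.List.pyRange_one_cons (by omega : j < (piece.length : Int)), List.foldl_cons]
    have hjr : j < (row.length : Int) := by omega
    have hreadj : PySem.List.pyGetD row j 0 = pvCell piece k j := by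
      rw [hrow j hj0 hjr, if_neg (by omega)]
    -- the one-step row update
    by_cases m1 : ((k - dy, j + dx) : Int × Int) ∈ fset
    · rw [if_pos m1]
      have hres := ih (j + 1) (by omega) (by omega) (PySem.List.pySetD row j 1)
        (by rw [PySem.List.length_pySetD]; omega)
        (by
          intro c hc0 hc1
          rw [PySem.List.length_pySetD] at hc1
          rw [pv_rowGet_set row j 1 c hj0 hjr hc0]
          by_cases hcj : c = j
          · subst hcj
            rw [if_pos rfl, if_pos (by omega)]
            unfold pvBFin
            rw [if_pos ((hmem _).1 m1)]
          · rw [if_neg hcj, hrow c hc0 hc1]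
            by_cases hlt : c < j
            · rw [if_pos hlt, if_pos (by omega)]
            · rw [if_neg hlt, if_neg (by omega)])
      rw [PySem.List.length_pySetD] at hres
      exact hres
    · rw [if_neg m1]
      by_cases h1 : PySem.List.pyGetD row j 0 = 1
      · rw [if_pos h1]
        have hres := ih (j + 1) (by omega) (by omega) (PySem.List.pySetD row j 0)
          (by rw [PySem.List.length_pySetD]; omega)
          (by
            intro c hc0 hc1
            rw [PySem.List.length_pySetD] at hc1
            rw [pv_rowGet_set row j 0 c hj0 hjr hc0]
            by_cases hcj : c = j
            · subst hcj
              rw [if_pos rfl, if_pos (by omega)]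
              unfold pvBFin
              rw [if_neg (fun hh => m1 ((hmem _).2 hh)), if_pos (hreadj ▸ h1)]
            · rw [if_neg hcj, hrow c hc0 hc1]
              by_cases hlt : c < j
              · rw [if_pos hlt, if_pos (by omega)]
              · rw [if_neg hlt, if_neg (by omega)])
        rw [PySem.List.length_pySetD] at hres
        exact hres
      · rw [if_neg h1]
        exact ih (j + 1) (by omega) (by omega) row hlen
          (by
            intro c hc0 hc1
            rw [hrow c hc0 hc1]
            by_cases hcj : c = j
            · subst hcj
              rw [if_neg (by omega), if_pos (by omega)]
              unfold pvBFin
              rw [if_neg (fun hh => m1 ((hmem _).2 hh)), if_neg (hreadj ▸ h1)]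
            · by_cases hlt : c < j
              · rw [if_pos hlt, if_pos (by omega)]
              · rw [if_neg hlt, if_neg (by omega)])

theorem pv_outerB (piece : List (List Int)) (filled fset : List (Int × Int))
    (hmem : ∀ p : Int × Int, p ∈ fset ↔ p ∈ filled) (dy dx : Int)
    (H : pvHyps piece filled dy dx) :
    ∀ (m : Nat) (k : Int), 0 ≤ k → k + (m : Int) = (piece.length : Int) →
    ∀ g, pvBInv piece filled dy dx k g →
    pvBInv piece filled dy dx (piece.length : Int)
      ((PySem.List.pyRange k (piece.length : Int) 1).foldl (fun g y =>
        PySem.List.pySetD g y ((PySem.List.pyRange 0 (piece.length : Int) 1).foldl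
          (fun row x => if (y - dy, x + dx) ∈ fset then PySem.List.pySetD row x 1
            else if PySem.List.pyGetD row x 0 = 1 then PySem.List.pySetD row x 0
            else row) (PySem.List.pyGetD g y []))) g) := by
  intro m
  induction m with
  | zero =>
    intro k hk0 hkm g hg
    rw [PySem.List.pyRange_one_eq_nil (show (piece.length : Int) ≤ k by omega), List.foldl_nil]
    rwa [show k = (piece.length : Int) by omega] at hg
  | succ m ih =>
    intro k hk0 hkm g hg
    obtain ⟨kn, rfl⟩ := Int.eq_ofNat_of_zero_le hk0
    have hkm' : (kn : Int) + ((m : Int) + 1) = (piece.length : Int) := by push_cast at hkm; omega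
    have hkn : (kn : Int) < (piece.length : Int) := by omega
    have hknl : kn < g.length := by
      have h1 : kn < piece.length := by exact_mod_cast hkn
      have h2 := hg.1.1
      omega
    rw [PySem.List.pyRange_one_cons hkn, List.foldl_cons]
    have hrlk : (piece.length : Int) ≤ pvRowLen piece (kn : Int) :=
      pv_rowlen_ge piece H.2.2.2 (kn : Int) (Int.natCast_nonneg kn) hkn
    have hrow0len : ((PySem.List.pyGetD g (kn : Int) []).length : Int) = pvRowLen piece (kn : Int) := by
      rw [PySem.List.pyGetD_natCast]
      unfold pvRowLen
      rw [Int.toNat_natCast]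
      exact_mod_cast congrArg Nat.cast (hg.1.2 kn)
    have hrow0 : ∀ c : Int, 0 ≤ c → c < ((PySem.List.pyGetD g (kn : Int) []).length : Int) →
        PySem.List.pyGetD (PySem.List.pyGetD g (kn : Int) []) c 0
          = if c < 0 then pvBFin piece filled dy dx (kn : Int) c else pvCell piece (kn : Int) c := by
      intro c hc0 hc1
      rw [if_neg (by omega)]
      have := hg.2 (kn : Int) c (Int.natCast_nonneg kn) hkn hc0 (by omega)
      rw [if_neg (by omega)] at this
      exact this
    have hrowres := pv_rowB piece filled fset hmem dy dx (kn : Int) piece.length 0 le_rfl (by omega)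
      (PySem.List.pyGetD g (kn : Int) []) (by omega) hrow0
    refine ih ((kn : Int) + 1) (by omega) (by omega) _ ?_
    beta_reduce
    rw [PySem.List.pySetD_natCast]
    refine ⟨⟨by rw [List.length_set]; exact hg.1.1, ?_⟩, ?_⟩
    · intro t
      rw [pv_getD_set]
      by_cases hcase : t = kn ∧ kn < g.length
      · obtain ⟨rfl, _⟩ := hcase
        rw [if_pos ⟨rfl, hknl⟩, hrowres.1, PySem.List.pyGetD_natCast]
        exact hg.1.2 t
      · rw [if_neg hcase]
        exact hg.1.2 t
    · intro r c hrr0 hrr1 hcc0 hcc1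
      obtain ⟨rn, rfl⟩ := Int.eq_ofNat_of_zero_le hrr0
      obtain ⟨cn, rfl⟩ := Int.eq_ofNat_of_zero_le hcc0
      by_cases hcase : rn = kn ∧ kn < g.length
      · obtain ⟨rfl, _⟩ := hcase
        rw [pv_cell_natCast, pv_getD_set, if_pos ⟨rfl, hknl⟩]
        have hv := hrowres.2 (cn : Int) (Int.natCast_nonneg cn) (by rw [hrow0len]; exact hcc1)
        rw [← PySem.List.pyGetD_natCast, hv]
        by_cases hcn : (cn : Int) < (piece.length : Int)
        · rw [if_pos hcn, if_pos ⟨by omega, hcn⟩]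
        · rw [if_neg hcn, if_neg (by rintro ⟨_, hb⟩; exact hcn hb)]
      · rw [pv_cell_natCast, pv_getD_set, if_neg hcase, ← pv_cell_natCast]
        rw [hg.2 (rn : Int) (cn : Int) (Int.natCast_nonneg rn) hrr1 (Int.natCast_nonneg cn) hcc1]
        have hrnk : rn ≠ kn := fun hh => hcase ⟨hh, hknl⟩
        have hiff : ((rn : Int) < (kn : Int) ∧ (cn : Int) < (piece.length : Int))
            ↔ ((rn : Int) < (kn : Int) + 1 ∧ (cn : Int) < (piece.length : Int)) := by
          constructor <;> (rintro ⟨h1, h2⟩; refine ⟨by omega, h2⟩)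
        exact if_congr hiff rfl rfl

-- ---- final-state and extensionality glue ----
theorem pv_grid_ext (piece g1 g2 : List (List Int)) (h1 : pvShape g1 piece) (h2 : pvShape g2 piece)
    (h : ∀ r c : Int, 0 ≤ r → r < (piece.length : Int) → 0 ≤ c → c < pvRowLen piece r →
      pvCell g1 r c = pvCell g2 r c) : g1 = g2 := by
  apply List.ext_getElem (h1.1.trans h2.1.symm)
  intro r hr1 hr2
  have hrp : r < piece.length := h1.1 ▸ hr1
  have e1 : g1.getD r [] = g1[r] := List.getD_eq_getElem g1 [] hr1
  have e2 : g2.getD r [] = g2[r] := List.getD_eq_getElem g2 [] hr2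
  have l1 : g1[r].length = (piece.getD r []).length := by rw [← e1]; exact h1.2 r
  have l2 : g2[r].length = (piece.getD r []).length := by rw [← e2]; exact h2.2 r
  apply List.ext_getElem (l1.trans l2.symm)
  intro c hc1 hc2
  have hcp : c < (piece.getD r []).length := l1 ▸ hc1
  have hv := h (r : Int) (c : Int) (Int.natCast_nonneg r) (by exact_mod_cast hrp)
    (Int.natCast_nonneg c) (by unfold pvRowLen; rw [Int.toNat_natCast]; exact_mod_cast hcp)
  rw [pv_cell_natCast, pv_cell_natCast, e1, e2,
    List.getD_eq_getElem _ _ hc1, List.getD_eq_getElem _ _ hc2] at hv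
  exact hv

theorem pv_fin_eq (piece : List (List Int)) (filled : List (Int × Int)) (dy dx : Int)
    (H : pvHyps piece filled dy dx) (r c : Int)
    (hr0 : 0 ≤ r) (hr1 : r < (piece.length : Int)) (hc0 : 0 ≤ c) :
    pvStv piece filled dy dx (-1) 0 r c
      = if r < (piece.length : Int) ∧ c < (piece.length : Int)
          then pvBFin piece filled dy dx r c else pvCell piece r c := by
  unfold pvStv pvBFin
  by_cases hcn : c < (piece.length : Int)
  · rw [if_pos (show r < (piece.length : Int) ∧ c < (piece.length : Int) from ⟨hr1, hcn⟩)]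
    by_cases m1 : ((r - dy, c + dx) : Int × Int) ∈ filled
    · have hb := H.1 _ m1
      simp only at hb
      rw [if_pos (show ((r - dy, c + dx) : Int × Int) ∈ filled
          ∧ ((-1 : Int) + 1 ≤ r - dy ∨ (r - dy = -1 ∧ c + dx < 0)) from ⟨m1, Or.inl (by omega)⟩),
        if_pos m1]
    · rw [if_neg (show ¬(((r - dy, c + dx) : Int × Int) ∈ filled
          ∧ ((-1 : Int) + 1 ≤ r - dy ∨ (r - dy = -1 ∧ c + dx < 0))) from
          by rintro ⟨hm, _⟩; exact m1 hm),
        if_neg m1]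
      by_cases m2 : ((r, c) : Int × Int) ∈ filled
      · have hv := (H.2.1 r c hr0 hr1 hc0 hcn).2 m2
        rw [if_pos (show ((r, c) : Int × Int) ∈ filled
            ∧ ((-1 : Int) + 1 ≤ r ∨ (r = -1 ∧ c < 0)) from
            ⟨m2, Or.inl (by have := H.1 _ m2; simp only at this; omega)⟩),
          if_pos hv]
      · have hv : ¬ pvCell piece r c = 1 := fun hh => m2 ((H.2.1 r c hr0 hr1 hc0 hcn).1 hh)
        rw [if_neg (show ¬(((r, c) : Int × Int) ∈ filled
            ∧ ((-1 : Int) + 1 ≤ r ∨ (r = -1 ∧ c < 0))) from by rintro ⟨hm, _⟩; exact m2 hm),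
          if_neg hv]
  · rw [if_neg (show ¬(r < (piece.length : Int) ∧ c < (piece.length : Int)) from
      by rintro ⟨_, hb⟩; exact hcn hb)]
    rw [if_neg (show ¬(((r - dy, c + dx) : Int × Int) ∈ filled
        ∧ ((-1 : Int) + 1 ≤ r - dy ∨ (r - dy = -1 ∧ c + dx < 0))) from ?_),
      if_neg (show ¬(((r, c) : Int × Int) ∈ filled
        ∧ ((-1 : Int) + 1 ≤ r ∨ (r = -1 ∧ c < 0))) from ?_)]
    · rintro ⟨hm, _⟩
      have := H.1 _ hm
      simp only at this
      omega
    · rintro ⟨hm, _⟩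
      have hb := H.1 _ hm
      have hd := H.2.2.1 _ hm
      simp only at hb hd
      omega

-- ===== VERDICT (by name: the statement is the Claim_ definition above) =====
theorem replace_cases_spec : Claim_equal_replace_cases := by
  intro piece _ hPre
  unfold Spec_replace_cases
  have hFeq := pv_filledB_eq piece
  have hbnd := pv_bounds_eq piece
  have hb2 : (pvBounds piece).2 = ((pvFilled piece).map Prod.fst).foldl max 0 := by rw [hbnd]
  have hb1 : (pvBounds piece).1
      = ((pvFilled piece).map Prod.snd).foldl min (piece.length : Int) := by rw [hbnd]
  have HA : pvHyps piece (pvFilledB piece)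
      ((piece.length : Int) - 1 - (pvBounds piece).2) (pvBounds piece).1 := by
    refine ⟨?_, ?_, ?_, hPre⟩
    · intro p hp; rw [hFeq] at hp; exact ((pv_mem_filled piece p).1 hp).1
    · intro y x hy0 hy1 hx0 hx1
      rw [hFeq, pv_mem_filled]
      exact ⟨fun h => ⟨⟨hy0, hy1, hx0, hx1⟩, h⟩, fun h => h.2⟩
    · intro p hp
      rw [hFeq] at hp
      have hpb := ((pv_mem_filled piece p).1 hp).1
      have hmax := pv_foldl_max_le ((pvFilled piece).map Prod.fst) 0 p.1
        (List.mem_map_of_mem hp)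
      have hmin := pv_foldl_min_le ((pvFilled piece).map Prod.snd) (piece.length : Int) p.2
        (List.mem_map_of_mem hp)
      have hmaxmem := pv_foldl_max_mem ((pvFilled piece).map Prod.fst) 0
      have hminmem := pv_foldl_min_mem ((pvFilled piece).map Prod.snd) (piece.length : Int)
      have hfb : ∀ z ∈ (pvFilled piece).map Prod.fst, 0 ≤ z ∧ z < (piece.length : Int) := by
        intro z hz
        rw [List.mem_map] at hz
        obtain ⟨t, ht, rfl⟩ := hz
        have := ((pv_mem_filled piece t).1 ht).1
        exact ⟨this.1, this.2.1⟩
      have hsb : ∀ z ∈ (pvFilled piece).map Prod.snd, 0 ≤ z ∧ z < (piece.length : Int) := by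
        intro z hz
        rw [List.mem_map] at hz
        obtain ⟨t, ht, rfl⟩ := hz
        have := ((pv_mem_filled piece t).1 ht).1
        exact ⟨this.2.2.1, this.2.2.2⟩
      have hM : 0 ≤ (pvBounds piece).2 ∧ (pvBounds piece).2 ≤ (piece.length : Int) - 1 := by
        constructor
        · rw [hb2]; exact pv_foldl_max_init_le _ 0
        · rw [hb2]
          rcases hmaxmem with hmm | hmm
          · rw [hmm]; omega
          · have := hfb _ hmm; omega
      have hL : 0 ≤ (pvBounds piece).1 := by
        rw [hb1]
        rcases hminmem with hmm | hmm
        · rw [hmm]; exact Int.natCast_nonneg _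
        · have := hsb _ hmm; omega
      have hpm : p.1 ≤ (pvBounds piece).2 := by rw [hb2]; exact hmax
      have hps : (pvBounds piece).1 ≤ p.2 := by rw [hb1]; exact hmin
      exact ⟨by omega, by omega, hL, hps⟩
  have hA := pv_outerA piece (pvFilledB piece)
    ((piece.length : Int) - 1 - (pvBounds piece).2) (pvBounds piece).1 HA piece.length
    ((piece.length : Int) - 1) rfl (by omega) piece
    (pv_initA piece (pvFilledB piece) _ _ HA)
  by_cases hF : pvFilledB piece = []
  · have hstv : ∀ r c : Int, pvStv piece (pvFilledB piece)
        ((piece.length : Int) - 1 - (pvBounds piece).2) (pvBounds piece).1 (-1) 0 r c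
        = pvCell piece r c := by
      intro r c
      unfold pvStv
      rw [hF]
      simp
    have hAeq : replace_cases piece = piece := by
      unfold replace_cases
      exact pv_grid_ext piece _ piece hA.1 (pv_shape_refl piece)
        (fun r c hr0 hr1 hc0 hc1 => by rw [hA.2 r c hr0 hr1 hc0 hc1, hstv])
    rw [hAeq]
    unfold replace_cases_alt
    rw [if_pos hF]
  · obtain ⟨q, F', hqF⟩ : ∃ q F', pvFilled piece = q :: F' := by
      rw [← hFeq]
      cases hcase : pvFilledB piece with
      | nil => exact absurd hcase hF
      | cons a l => exact ⟨a, l, rfl⟩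
    have hqmem : q ∈ pvFilled piece := by rw [hqF]; exact List.mem_cons_self
    have hqb := ((pv_mem_filled piece q).1 hqmem).1
    have hdy : pvDyB piece = (piece.length : Int) - 1 - (pvBounds piece).2 := by
      unfold pvDyB
      rw [hFeq, hb2, hqF, List.map_cons, pv_foldl_max_head q.1 _ hqb.1]
    have hdx : pvDxB piece = (pvBounds piece).1 := by
      unfold pvDxB
      rw [hFeq, hb1, hqF, List.map_cons,
        pv_foldl_min_head (piece.length : Int) q.2 _ (le_of_lt hqb.2.2.2)]
    have HB : pvHyps piece (pvFilledB piece) (pvDyB piece) (pvDxB piece) := by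
      rw [hdy, hdx]; exact HA
    have hB0 : pvBInv piece (pvFilledB piece) (pvDyB piece) (pvDxB piece) 0 piece := by
      refine ⟨pv_shape_refl piece, ?_⟩
      intro r c hr0 hr1 hc0 hc1
      rw [if_neg (by rintro ⟨ha, _⟩; omega)]
    have hB := pv_outerB piece (pvFilledB piece) (pvFSetB piece)
      (fun p => PySem.Set.mem_ofList (pvFilledB piece) p) (pvDyB piece) (pvDxB piece) HB
      piece.length 0 le_rfl (by omega) piece hB0
    have hBeq : replace_cases_alt piece
        = (PySem.List.pyRange 0 (piece.length : Int) 1).foldl (fun g y =>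
            PySem.List.pySetD g y ((PySem.List.pyRange 0 (piece.length : Int) 1).foldl
              (fun row x =>
                if (y - pvDyB piece, x + pvDxB piece) ∈ pvFSetB piece then
                  PySem.List.pySetD row x 1
                else if PySem.List.pyGetD row x 0 = 1 then PySem.List.pySetD row x 0
                else row) (PySem.List.pyGetD g y []))) piece := by
      unfold replace_cases_alt
      rw [if_neg hF]
    rw [hBeq]
    unfold replace_cases
    refine pv_grid_ext piece _ _ hA.1 hB.1 ?_
    intro r c hr0 hr1 hc0 hc1
    rw [hA.2 r c hr0 hr1 hc0 hc1, hB.2 r c hr0 hr1 hc0 hc1, ← hdy, ← hdx]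
    exact pv_fin_eq piece (pvFilledB piece) (pvDyB piece) (pvDxB piece) HB r c hr0 hr1 hc0
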